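-- pv_equiv track=rewrite | github.com/samerelsayegh-crypto/tennis-betting | src/utils/data_loader.py | parse_pbp_string
-- ===== SOURCE A (Python) =====
-- def parse_pbp_string(pbp_string: str, p1_is_server1: bool) -> list:
--     """
--     Parses a Sackmann pbp string (e.g. 'SSDSRRSRRR;RSSSRS;') into a list of 1s and 0s
--     indicating if the selected player won the point.
--
--     In Sackmann's logic:
--     - Points in a game are characters until the next ';', '.', or '/'.
--     - 'S' or 'A' means the Server of that game won the point.
--     - 'R' or 'D' means the Returner of that game won the point.
--     - server1 serves the first game of the match. Service alternates every game.
--     (This is a simplified assumption that generally holds, apart from tiebreaks where standard alternating is 2 points, but the string is often split correctly or we just alternate by game block).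
--
--     For sake of dashboard demonstration, we will rely on game blocks.
--     """
--     if not isinstance(pbp_string, str):
--         return []
--
--     game_blocks = pbp_string.replace('.', ';').split(';')
--
--     point_winners = []
--
--     server1_serving = True  # the first game is served by server1
--
--     for block in game_blocks:
--         if not block:
--             continue
--
--         # Tiebreak formatting in Sackmann's files sometimes uses '/' to indicate point blocks
--         points = block.replace('/', '')
--
--         for p in points:
--             if p in ["S", "A"]:
--                 # Current server won
--                 server1_won_point = server1_serving
--             elif p in ["R", "D"]:
--                 # Current returner won
--                 server1_won_point = not server1_serving
--             else:
--                 # Unknown character, skip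
--                 continue
--
--             if p1_is_server1:
--                 point_winners.append(1 if server1_won_point else 0)
--             else:
--                 point_winners.append(0 if server1_won_point else 1)
--
--         # Switch server after the game ends. Note: tiebreaks might mess with simple alternating server mapping but this is sufficient for backtesting general strategy.
--         server1_serving = not server1_serving
--
--     return point_winners
-- ===== SOURCE B (Python) =====
-- def parse_pbp_string(pbp_string: str, p1_is_server1: bool) -> list:
--     # Single left-to-right pass over the raw string; no split/replace passes.
--     if not isinstance(pbp_string, str):
--         return []
--     point_winners = []
--     server1_serving = True
--     block_has_content = False
--     for c in pbp_string:
--         if c in ';.':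
--             if block_has_content:
--                 server1_serving = not server1_serving
--             block_has_content = False
--         elif c in 'SA':
--             point_winners.append(1 if server1_serving == p1_is_server1 else 0)
--             block_has_content = True
--         elif c in 'RD':
--             point_winners.append(1 if server1_serving != p1_is_server1 else 0)
--             block_has_content = True
--         else:
--             block_has_content = True
--     return point_winners
-- ===== Notes on version B (the rewrite author's own statement) =====
-- stated objective: simpler
-- what changed: Replaced the replace/split-into-blocks pipeline with nested loops by one single left-to-right pass over the raw string that tracks the current server and a block-has-content flag.
import Mathlib
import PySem

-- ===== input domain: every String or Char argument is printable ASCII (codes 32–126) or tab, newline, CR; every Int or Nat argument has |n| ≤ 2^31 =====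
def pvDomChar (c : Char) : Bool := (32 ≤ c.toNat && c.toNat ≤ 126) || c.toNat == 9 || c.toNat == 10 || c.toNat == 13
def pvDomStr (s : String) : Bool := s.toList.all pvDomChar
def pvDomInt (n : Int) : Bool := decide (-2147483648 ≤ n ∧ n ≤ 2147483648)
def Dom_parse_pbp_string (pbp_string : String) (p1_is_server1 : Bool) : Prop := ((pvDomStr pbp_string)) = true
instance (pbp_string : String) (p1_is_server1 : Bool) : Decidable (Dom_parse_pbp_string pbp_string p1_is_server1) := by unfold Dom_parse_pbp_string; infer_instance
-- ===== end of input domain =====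

-- B replaces A's replace/split-into-blocks pipeline by one left-to-right pass over the raw
-- string (objective: simpler); the isinstance guard cannot fire under the type convention
-- (the argument is always a str), so neither port carries it.

-- ===== PORT A =====
def parse_pbp_string (pbp_string : String) (p1_is_server1 : Bool) : List Int :=
  let game_blocks := (PySem.Str.split? (PySem.Str.replace pbp_string "." ";") ";").getD []
  (game_blocks.foldl (fun (st : List Int × Bool) block =>
      if block = "" then st
      else
        let points := PySem.Str.replace block "/" ""
        let pw := points.toList.foldl (fun pw p =>
            if p = 'S' ∨ p = 'A' then
              pw ++ [if p1_is_server1 then (if st.2 then (1 : Int) else 0)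
                     else (if st.2 then 0 else 1)]
            else if p = 'R' ∨ p = 'D' then
              pw ++ [if p1_is_server1 then (if !st.2 then (1 : Int) else 0)
                     else (if !st.2 then 0 else 1)]
            else pw) st.1
        (pw, !st.2))
    ([], true)).1

-- ===== PORT B =====
def parse_pbp_string_alt (pbp_string : String) (p1_is_server1 : Bool) : List Int :=
  (pbp_string.toList.foldl (fun (st : List Int × Bool × Bool) c =>
      if c = ';' ∨ c = '.' then
        (st.1, (if st.2.2 then !st.2.1 else st.2.1), false)
      else if c = 'S' ∨ c = 'A' then
        (st.1 ++ [if st.2.1 == p1_is_server1 then (1 : Int) else 0], st.2.1, true)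
      else if c = 'R' ∨ c = 'D' then
        (st.1 ++ [if st.2.1 != p1_is_server1 then (1 : Int) else 0], st.2.1, true)
      else (st.1, st.2.1, true))
    ([], true, false)).1

-- ===== PRECONDITION & SPEC =====
def Spec_parse_pbp_string (pbp_string : String) (p1_is_server1 : Bool) (out : List Int) : Prop := out = parse_pbp_string_alt pbp_string p1_is_server1
instance (pbp_string : String) (p1_is_server1 : Bool) (out : List Int) : Decidable (Spec_parse_pbp_string pbp_string p1_is_server1 out) := by unfold Spec_parse_pbp_string; infer_instance

-- ===== CLAIM (what is proved, stated in full; the proofs are below) =====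
def Claim_equal_parse_pbp_string : Prop := ∀ (pbp_string : String) (p1_is_server1 : Bool), Dom_parse_pbp_string pbp_string p1_is_server1 → Spec_parse_pbp_string pbp_string p1_is_server1 (parse_pbp_string pbp_string p1_is_server1)

-- ===== LEMMAS AND PROOFS =====

-- single-char replace, written as a plain recursion
def pvRep (a : Char) (new : List Char) : List Char → List Char
  | [] => []
  | c :: t => (if c = a then new else [c]) ++ pvRep a new t

-- prepend to the first piece of a split
def pvConsH (p : List Char) : List (List Char) → List (List Char)
  | [] => [p]
  | h :: t => (p ++ h) :: t

-- split on a single separator character, written as a plain recursion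
def pvSplit1 (a : Char) : List Char → List (List Char)
  | [] => [[]]
  | c :: t => if c = a then [] :: pvSplit1 a t else pvConsH [c] (pvSplit1 a t)

theorem pvSplit1_ne_nil (a : Char) (l : List Char) : pvSplit1 a l ≠ [] := by
  cases l with
  | nil => simp [pvSplit1]
  | cons c t =>
    simp only [pvSplit1]
    split
    · simp
    · cases h : pvSplit1 a t <;> simp [pvConsH]

theorem pvIsPrefixOf_single (a c : Char) (t : List Char) :
    ([a].isPrefixOf (c :: t)) = (c == a) := by
  simp only [List.isPrefixOf, Bool.and_true]
  cases ha : (a == c) <;> cases hc : (c == a) <;> simp_all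

theorem pvReplace_go_eq (a : Char) (new : List Char) :
    ∀ (l : List Char) (fuel : Nat), l.length ≤ fuel → ∀ (acc : List Char),
      PySem.Chars.replace.go [a] new fuel l acc = acc.reverse ++ pvRep a new l := by
  intro l
  induction l with
  | nil =>
    intro fuel _ acc
    cases fuel <;> simp [PySem.Chars.replace.go.eq_def, pvRep]
  | cons c t ih =>
    intro fuel hf acc
    cases fuel with
    | zero => simp at hf
    | succ f =>
      rw [PySem.Chars.replace.go.eq_def]
      simp only [pvIsPrefixOf_single]
      by_cases hc : c = a
      · subst hc
        simp only [beq_self_eq_true, if_true, List.length_cons, List.length_nil,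
          List.drop_succ_cons, List.drop_zero]
        rw [ih f (by simp at hf; omega)]
        simp [pvRep]
      · rw [if_neg (by simp [hc])]
        rw [ih f (by simp at hf; omega)]
        simp [pvRep, hc]

theorem pvReplace_single (a : Char) (new l : List Char) :
    PySem.Chars.replace l [a] new = pvRep a new l := by
  unfold PySem.Chars.replace
  simp only [List.isEmpty_cons]
  exact pvReplace_go_eq a new l l.length le_rfl []

theorem pvSplitOn_go_eq (a : Char) :
    ∀ (l : List Char) (fuel : Nat), l.length ≤ fuel →
      ∀ (cur : List Char) (acc : List (List Char)),
      PySem.Chars.splitOn.go [a] fuel l cur acc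
        = acc.reverse ++ pvConsH cur.reverse (pvSplit1 a l) := by
  intro l
  induction l with
  | nil =>
    intro fuel _ cur acc
    cases fuel <;> simp [PySem.Chars.splitOn.go.eq_def, pvSplit1, pvConsH]
  | cons c t ih =>
    intro fuel hf cur acc
    cases fuel with
    | zero => simp at hf
    | succ f =>
      rw [PySem.Chars.splitOn.go.eq_def]
      simp only [pvIsPrefixOf_single]
      by_cases hc : c = a
      · subst hc
        simp only [beq_self_eq_true, if_true, List.length_cons, List.length_nil,
          List.drop_succ_cons, List.drop_zero]
        rw [ih f (by simp at hf; omega)]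
        rcases h : pvSplit1 c t with _ | ⟨hd, tl⟩
        · exact absurd h (pvSplit1_ne_nil c t)
        · simp [pvSplit1, h, pvConsH]
      · rw [if_neg (by simp [hc])]
        rw [ih f (by simp at hf; omega)]
        rcases h : pvSplit1 a t with _ | ⟨hd, tl⟩
        · exact absurd h (pvSplit1_ne_nil a t)
        · simp [pvSplit1, hc, h, pvConsH]

theorem pvSplitOn_single (a : Char) (l : List Char) :
    PySem.Chars.splitOn l [a] = pvSplit1 a l := by
  unfold PySem.Chars.splitOn
  rw [pvSplitOn_go_eq a l (l.length + 1) (by omega) [] []]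
  rcases h : pvSplit1 a l with _ | ⟨hd, tl⟩
  · exact absurd h (pvSplit1_ne_nil a l)
  · simp [pvConsH]

-- the points contributed by one character, in B's formulation
def pvPts (p1 server : Bool) (c : Char) : List Int :=
  if c = 'S' ∨ c = 'A' then [if server == p1 then 1 else 0]
  else if c = 'R' ∨ c = 'D' then [if server != p1 then 1 else 0]
  else []

def pvInner (p1 server : Bool) : List Char → List Int
  | [] => []
  | c :: t => pvPts p1 server c ++ pvInner p1 server t

theorem pvInner_append (p1 server : Bool) (x y : List Char) :
    pvInner p1 server (x ++ y) = pvInner p1 server x ++ pvInner p1 server y := by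
  induction x with
  | nil => simp [pvInner]
  | cons c t ih => simp [pvInner, ih]

theorem pvPts_SA (p1 server : Bool) (c : Char) (h : c = 'S' ∨ c = 'A') :
    pvPts p1 server c
      = [if p1 then (if server then (1 : Int) else 0) else (if server then 0 else 1)] := by
  simp only [pvPts, if_pos h]
  cases p1 <;> cases server <;> rfl

theorem pvPts_RD (p1 server : Bool) (c : Char) (h1 : ¬ (c = 'S' ∨ c = 'A'))
    (h2 : c = 'R' ∨ c = 'D') :
    pvPts p1 server c
      = [if p1 then (if !server then (1 : Int) else 0) else (if !server then 0 else 1)] := by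
  simp only [pvPts, if_neg h1, if_pos h2]
  cases p1 <;> cases server <;> rfl

-- A's inner fold equals acc ++ pvInner
theorem pvInnerFold (p1 server : Bool) (cs : List Char) : ∀ (acc : List Int),
    cs.foldl (fun pw p =>
        if p = 'S' ∨ p = 'A' then
          pw ++ [if p1 then (if server then (1 : Int) else 0) else (if server then 0 else 1)]
        else if p = 'R' ∨ p = 'D' then
          pw ++ [if p1 then (if !server then (1 : Int) else 0) else (if !server then 0 else 1)]
        else pw) acc
      = acc ++ pvInner p1 server cs := by
  induction cs with
  | nil => intro acc; simp [pvInner]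
  | cons c t ih =>
    intro acc
    simp only [List.foldl_cons, pvInner]
    by_cases h1 : c = 'S' ∨ c = 'A'
    · rw [if_pos h1, ih, pvPts_SA p1 server c h1, List.append_assoc]
    · rw [if_neg h1]
      by_cases h2 : c = 'R' ∨ c = 'D'
      · rw [if_pos h2, ih, pvPts_RD p1 server c h1 h2, List.append_assoc]
      · rw [if_neg h2, ih]
        have hp : pvPts p1 server c = [] := by simp [pvPts, h1, h2]
        simp [hp]

-- '/' contributes no point, so filtering it out does not change pvInner
theorem pvInner_rep_slash (p1 server : Bool) (cs : List Char) :
    pvInner p1 server (pvRep '/' [] cs) = pvInner p1 server cs := by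
  induction cs with
  | nil => rfl
  | cons c t ih =>
    simp only [pvRep, pvInner_append, pvInner, ih]
    by_cases hc : c = '/'
    · simp [hc, pvInner, pvPts]
    · simp [hc, pvInner]

theorem pvConsH_nil_split (a : Char) (l : List Char) :
    pvConsH [] (pvSplit1 a l) = pvSplit1 a l := by
  rcases h : pvSplit1 a l with _ | ⟨hd, tl⟩
  · exact absurd h (pvSplit1_ne_nil a l)
  · simp [pvConsH]

-- A's block-level step, on char lists
def pvStepA (p1 : Bool) (st : List Int × Bool) (b : List Char) : List Int × Bool :=
  if b = [] then st else (st.1 ++ pvInner p1 st.2 b, !st.2)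

def pvStepB (p1 : Bool) (st : List Int × Bool × Bool) (c : Char) : List Int × Bool × Bool :=
  if c = ';' ∨ c = '.' then (st.1, (if st.2.2 then !st.2.1 else st.2.1), false)
  else if c = 'S' ∨ c = 'A' then (st.1 ++ [if st.2.1 == p1 then (1 : Int) else 0], st.2.1, true)
  else if c = 'R' ∨ c = 'D' then (st.1 ++ [if st.2.1 != p1 then (1 : Int) else 0], st.2.1, true)
  else (st.1, st.2.1, true)

theorem pvMain (p1 : Bool) (l : List Char) :
    ∀ (cur : List Char) (acc : List Int) (server : Bool),
    (List.foldl (pvStepB p1) (acc ++ pvInner p1 server cur, server, !cur.isEmpty) l).1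
      = (List.foldl (pvStepA p1) (acc, server)
          (pvConsH cur (pvSplit1 ';' (pvRep '.' [';'] l)))).1 := by
  induction l with
  | nil =>
    intro cur acc server
    simp only [List.foldl_nil, pvRep, pvSplit1, pvConsH, List.append_nil, List.foldl_cons,
      pvStepA]
    by_cases hcur : cur = []
    · simp [hcur, pvInner]
    · simp [hcur]
  | cons c t ih =>
    intro cur acc server
    by_cases hsep : c = ';' ∨ c = '.'
    · have hmap : pvRep '.' [';'] (c :: t) = ';' :: pvRep '.' [';'] t := by
        rcases hsep with h | h <;> simp [pvRep, h]
      rw [hmap]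
      have hsplit : pvSplit1 ';' (';' :: pvRep '.' [';'] t)
          = [] :: pvSplit1 ';' (pvRep '.' [';'] t) := by simp [pvSplit1]
      rw [hsplit]
      have hch : pvConsH cur ([] :: pvSplit1 ';' (pvRep '.' [';'] t))
          = cur :: pvSplit1 ';' (pvRep '.' [';'] t) := by simp [pvConsH]
      rw [hch, List.foldl_cons, List.foldl_cons]
      have hA : pvStepA p1 (acc, server) cur
          = (if cur = [] then (acc, server) else (acc ++ pvInner p1 server cur, !server)) := by
        by_cases hcur : cur = [] <;> simp [pvStepA, hcur]
      have hB : pvStepB p1 (acc ++ pvInner p1 server cur, server, !cur.isEmpty) c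
          = (acc ++ pvInner p1 server cur, (if cur = [] then server else !server), false) := by
        by_cases hcur : cur = [] <;> simp [pvStepB, hsep, hcur, pvInner]
      rw [hB, hA]
      by_cases hcur : cur = []
      · simp only [hcur, pvInner, List.append_nil]
        have := ih [] acc server
        simpa [pvInner, pvConsH_nil_split] using this
      · simp only [if_neg hcur]
        have := ih [] (acc ++ pvInner p1 server cur) (!server)
        simpa [pvInner, pvConsH_nil_split] using this
    · have hmap : pvRep '.' [';'] (c :: t) = c :: pvRep '.' [';'] t := by
        have : ¬ c = '.' := fun h => hsep (Or.inr h)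
        simp [pvRep, this]
      rw [hmap]
      have hne : ¬ c = ';' := fun h => hsep (Or.inl h)
      simp only [pvSplit1, if_neg hne]
      have hcomb : pvConsH cur (pvConsH [c] (pvSplit1 ';' (pvRep '.' [';'] t)))
          = pvConsH (cur ++ [c]) (pvSplit1 ';' (pvRep '.' [';'] t)) := by
        rcases h : pvSplit1 ';' (pvRep '.' [';'] t) with _ | ⟨hd, tl⟩
        · exact absurd h (pvSplit1_ne_nil _ _)
        · simp [pvConsH]
      rw [hcomb]
      rw [List.foldl_cons]
      have hstep : pvStepB p1 (acc ++ pvInner p1 server cur, server, !cur.isEmpty) c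
          = (acc ++ pvInner p1 server (cur ++ [c]), server, !(cur ++ [c]).isEmpty) := by
        have he : ((cur ++ [c]).isEmpty) = false := by
          cases cur <;> simp
        simp only [pvStepB, if_neg hsep, pvInner_append, pvInner, pvPts, List.append_nil, he]
        by_cases h1 : c = 'S' ∨ c = 'A'
        · simp [h1, List.append_assoc]
        · by_cases h2 : c = 'R' ∨ c = 'D'
          · simp [h1, h2, List.append_assoc]
          · simp [h1, h2]
      rw [hstep]
      exact ih (cur ++ [c]) acc server

theorem pvOfList_eq_empty_iff (b : List Char) : (String.ofList b = "") ↔ b = [] := by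
  constructor
  · intro h
    have := congrArg String.toList h
    simpa using this
  · intro h; subst h; rfl

-- ===== VERDICT (by name: the statement is the Claim_ definition above) =====
theorem parse_pbp_string_spec : Claim_equal_parse_pbp_string := by
  intro s p1 _
  unfold Spec_parse_pbp_string
  have hB : parse_pbp_string_alt s p1
      = (List.foldl (pvStepB p1) ([], true, false) s.toList).1 := rfl
  have htl : (PySem.Str.replace s "." ";").toList = pvRep '.' [';'] s.toList := by
    rw [PySem.Str.toList_replace]
    have h1 : ("." : String).toList = ['.'] := by decide
    have h2 : (";" : String).toList = [';'] := by decide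
    rw [h1, h2, pvReplace_single]
  have hsplit : PySem.Str.split? (PySem.Str.replace s "." ";") ";"
      = some (List.map String.ofList (pvSplit1 ';' (pvRep '.' [';'] s.toList))) := by
    unfold PySem.Str.split? PySem.Chars.split?
    have h2 : (";" : String).toList = [';'] := by decide
    rw [h2, htl]
    simp [pvSplitOn_single]
  have hA : parse_pbp_string s p1
      = (List.foldl (pvStepA p1) ([], true) (pvSplit1 ';' (pvRep '.' [';'] s.toList))).1 := by
    unfold parse_pbp_string
    rw [hsplit]
    simp only [Option.getD_some]
    rw [List.foldl_map]
    congr 1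
    apply PySem.List.foldl_congr_mem
    intro st b _
    by_cases hb : b = []
    · simp [pvStepA, hb]
    · rw [if_neg (by simpa [pvOfList_eq_empty_iff] using hb)]
      have hpts : (PySem.Str.replace (String.ofList b) "/" "").toList
          = pvRep '/' [] b := by
        rw [PySem.Str.toList_replace]
        have h1 : ("/" : String).toList = ['/'] := by decide
        have h2 : ("" : String).toList = [] := by decide
        simp only [h1, h2, String.toList_ofList]
        rw [pvReplace_single]
      simp only [hpts]
      rw [pvInnerFold p1 st.2 (pvRep '/' [] b) st.1, pvInner_rep_slash]
      simp [pvStepA, hb]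
  rw [hA, hB]
  have hm := pvMain p1 s.toList [] [] true
  simp only [pvInner, List.append_nil, List.isEmpty_nil, Bool.not_true,
    pvConsH_nil_split] at hm
  exact hm.symm
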